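-- pv_equiv track=rewrite | github.com/miliar/Code_Jam_Webscraper | solutions_python/solutions_year17_round0_nr3/577.py | counts
-- ===== SOURCE A (Python) =====
-- def counts(n, iter_num):
--     ans={}
--     ans['odd']=(0, 0)
--     ans['even']=(0, 0)
--
--     if iter_num==0:
--         if n%2==1:
--             ans['odd']=(n, 1)
--         else:
--             ans['even']=(n, 1)
--     else:
--         x=counts(n, iter_num-1)
--         amax=(max(0, (x['odd'][0]-1)//2), x['odd'][1])
--         amin=(max(0, (x['odd'][0]-1)//2), x['odd'][1])
--         bmax=((x['even'][0])//2, x['even'][1])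
--         bmin=(max(0, x['even'][0]//2-1), x['even'][1])
--
--         odds=[]
--         evens=[]
--
--         for i in [amax, amin, bmax, bmin]:
--             if i[0]%2==1:
--                 odds.append(i)
--             elif i[0]==0:
--                 continue
--             else:
--                 evens.append(i)
--         totodds=0
--         totevens=0
--         for i in odds:
--             totodds+=i[1]
--         for i in evens:
--             totevens+=i[1]
--         if totodds>0:
--             ans['odd']=(odds[0][0], totodds)
--         if totevens>0:
--             ans['even']=(evens[0][0], totevens)
--     return ans
-- ===== SOURCE B (Python) =====
-- def counts(n, iter_num):
--     # Iterative state machine over a pair (odd_state, even_state) instead of A's recursion.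
--     if n % 2 == 1:
--         odd, even = (n, 1), (0, 0)
--     else:
--         odd, even = (0, 0), (n, 1)
--     for _ in range(iter_num):
--         a = (max(0, (odd[0] - 1) // 2), odd[1])
--         b = (even[0] // 2, even[1])
--         c = (max(0, even[0] // 2 - 1), even[1])
--         cand = [a, a, b, c]
--         odds = [p for p in cand if p[0] % 2 == 1]
--         evens = [p for p in cand if p[0] % 2 == 0 and p[0] != 0]
--         odd = (odds[0][0], sum(p[1] for p in odds)) if odds else (0, 0)
--         even = (evens[0][0], sum(p[1] for p in evens)) if evens else (0, 0)
--     return {'odd': odd, 'even': even}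
-- ===== Notes on version B (the rewrite author's own statement) =====
-- stated objective: simpler
-- what changed: A recurses from iter_num down to 0 building a fresh dict at every level; B keeps a plain (odd_state, even_state) pair and iterates the transition iter_num times with comprehension filters, building the dict once at the end.
import Mathlib
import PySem

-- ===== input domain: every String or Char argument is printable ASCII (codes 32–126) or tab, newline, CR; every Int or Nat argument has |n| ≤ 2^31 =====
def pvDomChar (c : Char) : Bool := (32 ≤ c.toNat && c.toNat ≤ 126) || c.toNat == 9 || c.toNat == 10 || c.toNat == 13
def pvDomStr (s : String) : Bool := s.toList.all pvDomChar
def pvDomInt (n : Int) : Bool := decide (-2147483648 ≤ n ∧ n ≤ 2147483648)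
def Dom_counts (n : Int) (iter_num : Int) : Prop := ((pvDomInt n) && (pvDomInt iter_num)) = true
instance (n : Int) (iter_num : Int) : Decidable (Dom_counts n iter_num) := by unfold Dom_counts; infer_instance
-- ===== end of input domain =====

-- B replaces A's recursion on iter_num by an iterative loop over a pair of (value, count)
-- states with comprehension-style filters; objective: simpler (no dict plumbing, no recursion depth limit).

-- ===== PORT A =====
-- A recurses with iter_num-1 down to 0; for iter_num < 0 the Python recursion never reaches
-- its base case (RecursionError) — those inputs are excluded by Pre_counts, so A's countdown
-- is ported as structural recursion on iter_num.toNat (exact for iter_num ≥ 0).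
def countsAGo (n : Int) : Nat → PySem.Dict String (Int × Int)
  | 0 =>
      let ans := (((PySem.Dict.empty : PySem.Dict String (Int × Int)).insert "odd" (0, 0)).insert "even" (0, 0))
      if PySem.Int.mod n 2 == 1 then ans.insert "odd" (n, 1) else ans.insert "even" (n, 1)
  | k + 1 =>
      let ans := (((PySem.Dict.empty : PySem.Dict String (Int × Int)).insert "odd" (0, 0)).insert "even" (0, 0))
      let x := countsAGo n k
      -- x['odd'] / x['even']: the keys are always present, so getD is exact here
      let xo := x.getD "odd" (0, 0)
      let xe := x.getD "even" (0, 0)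
      let amax : Int × Int := (max 0 (PySem.Int.floordiv (xo.1 - 1) 2), xo.2)
      let amin : Int × Int := (max 0 (PySem.Int.floordiv (xo.1 - 1) 2), xo.2)
      let bmax : Int × Int := (PySem.Int.floordiv xe.1 2, xe.2)
      let bmin : Int × Int := (max 0 (PySem.Int.floordiv xe.1 2 - 1), xe.2)
      let buckets := [amax, amin, bmax, bmin].foldl
        (fun (st : List (Int × Int) × List (Int × Int)) i =>
          if PySem.Int.mod i.1 2 == 1 then (st.1 ++ [i], st.2)
          else if i.1 == 0 then st
          else (st.1, st.2 ++ [i])) ([], [])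
      let odds := buckets.1
      let evens := buckets.2
      let totodds := odds.foldl (fun s i => s + i.2) 0
      let totevens := evens.foldl (fun s i => s + i.2) 0
      -- odds[0] / evens[0]: the guard tot… > 0 ensures the list is nonempty, so headD is exact
      let ans := if totodds > 0 then ans.insert "odd" ((odds.headD (0, 0)).1, totodds) else ans
      let ans := if totevens > 0 then ans.insert "even" ((evens.headD (0, 0)).1, totevens) else ans
      ans

def counts (n : Int) (iter_num : Int) : List (String × Int × Int) :=
  (countsAGo n iter_num.toNat).items

-- ===== PORT B =====
def countsBStep (st : (Int × Int) × (Int × Int)) : (Int × Int) × (Int × Int) :=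
  let a : Int × Int := (max 0 (PySem.Int.floordiv (st.1.1 - 1) 2), st.1.2)
  let b : Int × Int := (PySem.Int.floordiv st.2.1 2, st.2.2)
  let c : Int × Int := (max 0 (PySem.Int.floordiv st.2.1 2 - 1), st.2.2)
  let cand := [a, a, b, c]
  let odds := cand.filter (fun p => PySem.Int.mod p.1 2 == 1)
  let evens := cand.filter (fun p => PySem.Int.mod p.1 2 == 0 && p.1 != 0)
  (match odds with
   | [] => (0, 0)
   | p :: _ => (p.1, (odds.map (·.2)).sum),
   match evens with
   | [] => (0, 0)
   | p :: _ => (p.1, (evens.map (·.2)).sum))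

-- the initial (odd_state, even_state) pair of Source B
def pvBase (n : Int) : (Int × Int) × (Int × Int) :=
  if PySem.Int.mod n 2 == 1 then ((n, 1), (0, 0)) else ((0, 0), (n, 1))

def counts_alt (n : Int) (iter_num : Int) : List (String × Int × Int) :=
  let fin := (PySem.List.pyRange 0 iter_num 1).foldl (fun st _ => countsBStep st) (pvBase n)
  [("odd", fin.1), ("even", fin.2)]

-- ===== PRECONDITION & SPEC =====
-- Pre_ excludes iter_num < 0, on which A's recursion never reaches its base case (RecursionError).
def Pre_counts (n : Int) (iter_num : Int) : Prop := 0 ≤ iter_num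
instance (n : Int) (iter_num : Int) : Decidable (Pre_counts n iter_num) := by unfold Pre_counts; infer_instance

def pvWitness_counts : Int × Int := (3, 2)

def Spec_counts (n : Int) (iter_num : Int) (out : List (String × Int × Int)) : Prop := out = counts_alt n iter_num
instance (n : Int) (iter_num : Int) (out : List (String × Int × Int)) : Decidable (Spec_counts n iter_num out) := by unfold Spec_counts; infer_instance

-- ===== CLAIM (what is proved, stated in full; the proofs are below) =====
def Claim_equal_counts : Prop := ∀ (n : Int) (iter_num : Int), Dom_counts n iter_num → Pre_counts n iter_num → Spec_counts n iter_num (counts n iter_num)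

-- ===== LEMMAS AND PROOFS =====

/-- Invariant on a state component: either the untouched default `(0,0)` or a count ≥ 1. -/
def pvInv (p : Int × Int) : Prop := p = (0, 0) ∨ 1 ≤ p.2

/-- A's single-pass bucketing fold is B's pair of filters. -/
lemma pvFoldl_bucket (l o e : List (Int × Int)) :
    l.foldl (fun (st : List (Int × Int) × List (Int × Int)) i =>
      if PySem.Int.mod i.1 2 == 1 then (st.1 ++ [i], st.2)
      else if i.1 == 0 then st
      else (st.1, st.2 ++ [i])) (o, e)
    = (o ++ l.filter (fun p => PySem.Int.mod p.1 2 == 1),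
       e ++ l.filter (fun p => PySem.Int.mod p.1 2 == 0 && p.1 != 0)) := by
  induction l generalizing o e with
  | nil => simp
  | cons h t ih =>
    rw [List.foldl_cons, List.filter_cons, List.filter_cons]
    rcases PySem.Int.mod_two_eq h.1 with hm | hm <;> rw [hm]
    · by_cases hz : h.1 = 0
      · rw [if_neg (by decide), if_pos (by simp [hz]), if_neg (by decide), if_neg (by simp [hz])]
        exact ih o e
      · rw [if_neg (by decide), if_neg (by simp [hz]), if_neg (by decide), if_pos (by simp [hz])]
        rw [ih]
        simp only [List.append_assoc, List.singleton_append]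
    · rw [if_pos (by decide), if_pos (by decide), if_neg (by simp)]
      rw [ih]
      simp only [List.append_assoc, List.singleton_append]

/-- A's running-total fold is B's sum of the mapped counts. -/
lemma pvFoldl_sum (l : List (Int × Int)) (s : Int) :
    l.foldl (fun s i => s + i.2) s = s + (l.map (·.2)).sum := by
  induction l generalizing s with
  | nil => simp
  | cons h t ih => simp [List.foldl_cons, ih]; ring

lemma pvSum_nonneg {l : List (Int × Int)} (h : ∀ x ∈ l, 1 ≤ x.2) :
    0 ≤ (l.map (·.2)).sum :=
  List.sum_nonneg (fun x hx => by
    simp only [List.mem_map] at hx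
    obtain ⟨y, hy, rfl⟩ := hx
    exact le_trans zero_le_one (h y hy))

lemma pvItems00 : ((((PySem.Dict.empty : PySem.Dict String (Int × Int)).insert "odd" (0, 0)).insert "even" (0, 0))).items = [("odd", (0, 0)), ("even", (0, 0))] := by
  simp [PySem.Dict.insert, PySem.Dict.empty]

lemma pvItemsOdd (v : Int × Int) : (((((PySem.Dict.empty : PySem.Dict String (Int × Int)).insert "odd" (0, 0)).insert "even" (0, 0))).insert "odd" v).items = [("odd", v), ("even", (0, 0))] := by
  simp [PySem.Dict.insert, PySem.Dict.empty]

lemma pvItemsEven (w : Int × Int) : (((((PySem.Dict.empty : PySem.Dict String (Int × Int)).insert "odd" (0, 0)).insert "even" (0, 0))).insert "even" w).items = [("odd", (0, 0)), ("even", w)] := by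
  simp [PySem.Dict.insert, PySem.Dict.empty]

lemma pvItemsBoth (v w : Int × Int) : ((((((PySem.Dict.empty : PySem.Dict String (Int × Int)).insert "odd" (0, 0)).insert "even" (0, 0))).insert "odd" v).insert "even" w).items = [("odd", v), ("even", w)] := by
  simp [PySem.Dict.insert, PySem.Dict.empty]

/-- One recursive step of A is one B-step, preserving the invariant. -/
lemma pvStep (n : Int) (k : Nat) (o e : Int × Int)
    (hit : (countsAGo n k).items = [("odd", o), ("even", e)])
    (ho : pvInv o) (he : pvInv e) :
    (countsAGo n (k + 1)).items = [("odd", (countsBStep (o, e)).1), ("even", (countsBStep (o, e)).2)]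
    ∧ pvInv (countsBStep (o, e)).1 ∧ pvInv (countsBStep (o, e)).2 := by
  have hx : countsAGo n k = PySem.Dict.mk [("odd", o), ("even", e)] := PySem.Dict.ext hit
  have hgo : (PySem.Dict.mk [("odd", o), ("even", e)]).getD "odd" (0, 0) = o := rfl
  have hge : (PySem.Dict.mk [("odd", o), ("even", e)]).getD "even" (0, 0) = e := rfl
  simp only [countsAGo, countsBStep]
  rw [hx, hgo, hge, pvFoldl_bucket]
  simp only [List.nil_append]
  set a : Int × Int := (max 0 (PySem.Int.floordiv (o.1 - 1) 2), o.2) with ha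
  set b : Int × Int := (PySem.Int.floordiv e.1 2, e.2) with hb
  set c : Int × Int := (max 0 (PySem.Int.floordiv e.1 2 - 1), e.2) with hc
  have hA : pvInv o → a.1 = 0 ∨ 1 ≤ a.2 := by
    intro h
    rcases h with h | h
    · left; rw [ha, h]; decide
    · right; exact h
  have hB : pvInv e → b.1 = 0 ∨ 1 ≤ b.2 := by
    intro h
    rcases h with h | h
    · left; rw [hb, h]; decide
    · right; exact h
  have hC : pvInv e → c.1 = 0 ∨ 1 ≤ c.2 := by
    intro h
    rcases h with h | h
    · left; rw [hc, h]; decide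
    · right; exact h
  have hodds : ∀ x ∈ [a, a, b, c].filter (fun p => PySem.Int.mod p.1 2 == 1), 1 ≤ x.2 := by
    intro x hx'
    rw [List.mem_filter] at hx'
    obtain ⟨hmem, hp⟩ := hx'
    have hz : x.1 ≠ 0 := by
      intro h0
      rw [h0] at hp
      exact absurd hp (by decide)
    simp only [List.mem_cons, List.not_mem_nil, or_false] at hmem
    rcases hmem with rfl | rfl | rfl | rfl
    · exact (hA ho).resolve_left hz
    · exact (hA ho).resolve_left hz
    · exact (hB he).resolve_left hz
    · exact (hC he).resolve_left hz
  have hevens : ∀ x ∈ [a, a, b, c].filter (fun p => PySem.Int.mod p.1 2 == 0 && p.1 != 0), 1 ≤ x.2 := by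
    intro x hx'
    rw [List.mem_filter] at hx'
    obtain ⟨hmem, hp⟩ := hx'
    have hz : x.1 ≠ 0 := by
      simp only [Bool.and_eq_true, bne_iff_ne, ne_eq] at hp
      exact hp.2
    simp only [List.mem_cons, List.not_mem_nil, or_false] at hmem
    rcases hmem with rfl | rfl | rfl | rfl
    · exact (hA ho).resolve_left hz
    · exact (hA ho).resolve_left hz
    · exact (hB he).resolve_left hz
    · exact (hC he).resolve_left hz
  rcases hOE : [a, a, b, c].filter (fun p => PySem.Int.mod p.1 2 == 1) with _ | ⟨p, ot⟩ <;>
    rcases hEE : [a, a, b, c].filter (fun p => PySem.Int.mod p.1 2 == 0 && p.1 != 0) with _ | ⟨q, et⟩ <;>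
    rw [hOE] at hodds ⊢ <;> rw [hEE] at hevens ⊢ <;>
    simp only [pvFoldl_sum, List.map_cons, List.sum_cons,
      List.foldl_nil, List.headD_cons, zero_add]
  · rw [if_neg (by omega), if_neg (by omega)]
    exact ⟨pvItems00, Or.inl rfl, Or.inl rfl⟩
  · have h1 := hevens q List.mem_cons_self
    have h2 := pvSum_nonneg (fun x hx' => hevens x (List.mem_cons_of_mem _ hx'))
    rw [if_pos (by omega), if_neg (by omega)]
    exact ⟨pvItemsEven _, Or.inl rfl, Or.inr (by omega)⟩
  · have h1 := hodds p List.mem_cons_self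
    have h2 := pvSum_nonneg (fun x hx' => hodds x (List.mem_cons_of_mem _ hx'))
    rw [if_neg (by omega), if_pos (by omega)]
    exact ⟨pvItemsOdd _, Or.inr (by omega), Or.inl rfl⟩
  · have h1 := hodds p List.mem_cons_self
    have h2 := pvSum_nonneg (fun x hx' => hodds x (List.mem_cons_of_mem _ hx'))
    have h3 := hevens q List.mem_cons_self
    have h4 := pvSum_nonneg (fun x hx' => hevens x (List.mem_cons_of_mem _ hx'))
    rw [if_pos (by omega), if_pos (by omega)]
    exact ⟨pvItemsBoth _ _, Or.inr (by omega), Or.inr (by omega)⟩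

/-- A's recursion computes exactly the iterated B-step, preserving the invariant. -/
lemma pvMain (n : Int) (k : Nat) :
    (countsAGo n k).items = [("odd", (countsBStep^[k] (pvBase n)).1), ("even", (countsBStep^[k] (pvBase n)).2)]
    ∧ pvInv (countsBStep^[k] (pvBase n)).1 ∧ pvInv (countsBStep^[k] (pvBase n)).2 := by
  induction k with
  | zero =>
    simp only [Function.iterate_zero, id]
    unfold countsAGo pvBase
    rcases PySem.Int.mod_two_eq n with hm | hm <;> rw [hm]
    · rw [if_neg (by decide), if_neg (by decide)]
      exact ⟨pvItemsEven _, Or.inl rfl, Or.inr le_rfl⟩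
    · rw [if_pos (by decide), if_pos (by decide)]
      exact ⟨pvItemsOdd _, Or.inr le_rfl, Or.inl rfl⟩
  | succ k ih =>
    obtain ⟨h1, h2, h3⟩ := ih
    rw [Function.iterate_succ_apply']
    exact pvStep n k _ _ h1 h2 h3

lemma pvFoldl_const_iterate {α β : Type} (f : α → α) (l : List β) (x : α) :
    l.foldl (fun st _ => f st) x = f^[l.length] x := by
  induction l generalizing x with
  | nil => simp
  | cons h t ih => simp [List.foldl_cons, ih, Function.iterate_succ_apply]

lemma pvAlt_eq_iterate (n iter_num : Int) :
    counts_alt n iter_num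
    = [("odd", (countsBStep^[iter_num.toNat] (pvBase n)).1), ("even", (countsBStep^[iter_num.toNat] (pvBase n)).2)] := by
  simp only [counts_alt, pvFoldl_const_iterate, PySem.List.length_pyRange_one, Int.sub_zero]

-- ===== VERDICT (by name: the statement is the Claim_ definition above) =====
theorem counts_spec : Claim_equal_counts := by
  intro n iter_num _ _
  unfold Spec_counts counts
  rw [pvAlt_eq_iterate, (pvMain n iter_num.toNat).1]
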